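-- pv_equiv track=rewrite | github.com/banggeunho/CodingTest | 2023/예제풀이/카엔프준비/Binary Manipulation.py | checkRule1
-- ===== SOURCE A (Python) =====
-- def checkRule1(arr):
--     for i in range(len(arr)-1):
--         find = True
--         if arr[i+1] == '1':
--             for j in range(i+2, len(arr)):
--                 if arr[j] != '0':
--                     find = False
--                     break
--             if find:
--                 return i
--     return None
-- ===== SOURCE B (Python) =====
-- def checkRule1(arr):
--     # Single backward scan: find the last non-'0' element; if it is '1' at
--     # index k >= 1, the answer is k-1, otherwise there is no answer.
--     for k in range(len(arr) - 1, 0, -1):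
--         if arr[k] != '0':
--             return k - 1 if arr[k] == '1' else None
--     return None
-- ===== Notes on version B (the rewrite author's own statement) =====
-- stated objective: faster
-- what changed: Replaced the forward scan with a quadratic all-zero-suffix recheck for each candidate by a single backward scan that stops at the last non-'0' element and answers from it.
import Mathlib
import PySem

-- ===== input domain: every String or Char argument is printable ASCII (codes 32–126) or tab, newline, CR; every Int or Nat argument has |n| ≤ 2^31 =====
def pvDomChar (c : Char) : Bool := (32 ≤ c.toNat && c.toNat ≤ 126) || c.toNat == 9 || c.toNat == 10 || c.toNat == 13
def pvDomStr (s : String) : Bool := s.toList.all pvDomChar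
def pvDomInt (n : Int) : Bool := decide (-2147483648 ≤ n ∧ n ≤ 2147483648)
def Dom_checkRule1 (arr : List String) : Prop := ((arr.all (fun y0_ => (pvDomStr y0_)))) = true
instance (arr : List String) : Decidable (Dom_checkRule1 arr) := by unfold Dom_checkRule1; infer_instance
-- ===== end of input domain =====

-- B replaces A's quadratic forward scan (recheck the whole suffix for each candidate)
-- by a single O(n) backward scan stopping at the last non-'0' element.
-- All list indexing in both Pythons is in range, so pyGetD with a dummy default is exact.

-- ===== PORT A =====
-- inner loop: 'for j in range(i+2, len(arr)): if arr[j] != '0': find = False; break'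
def pvInnerA (arr : List String) (js : List Int) : Bool :=
  match js with
  | [] => true
  | j :: rest =>
    if PySem.List.pyGetD arr j "" ≠ "0" then false else pvInnerA arr rest

-- outer loop over i in range(len(arr)-1)
def pvOuterA (arr : List String) (is : List Int) : Option Int :=
  match is with
  | [] => none
  | i :: rest =>
    if PySem.List.pyGetD arr (i + 1) "" = "1" then
      if pvInnerA arr (PySem.List.pyRange (i + 2) (arr.length : Int) 1) then some i
      else pvOuterA arr rest
    else pvOuterA arr rest

def checkRule1 (arr : List String) : Option Int :=
  pvOuterA arr (PySem.List.pyRange 0 ((arr.length : Int) - 1) 1)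

-- ===== PORT B =====
-- backward loop over k in range(len(arr)-1, 0, -1)
def pvScanB (arr : List String) (ks : List Int) : Option Int :=
  match ks with
  | [] => none
  | k :: rest =>
    if PySem.List.pyGetD arr k "" ≠ "0" then
      if PySem.List.pyGetD arr k "" = "1" then some (k - 1) else none
    else pvScanB arr rest

def checkRule1_alt (arr : List String) : Option Int :=
  pvScanB arr (PySem.List.pyRange ((arr.length : Int) - 1) 0 (-1))

-- ===== PRECONDITION & SPEC =====
def Spec_checkRule1 (arr : List String) (out : Option Int) : Prop := out = checkRule1_alt arr
instance (arr : List String) (out : Option Int) : Decidable (Spec_checkRule1 arr out) := by unfold Spec_checkRule1; infer_instance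

-- ===== CLAIM (what is proved, stated in full; the proofs are below) =====
def Claim_equal_checkRule1 : Prop := ∀ (arr : List String), Dom_checkRule1 arr → Spec_checkRule1 arr (checkRule1 arr)

-- ===== LEMMAS AND PROOFS =====

theorem pvInnerA_iff (arr : List String) (js : List Int) :
    pvInnerA arr js = true ↔ ∀ j ∈ js, PySem.List.pyGetD arr j "" = "0" := by
  induction js with
  | nil => simp [pvInnerA]
  | cons j rest ih =>
    by_cases h : PySem.List.pyGetD arr j "" = "0" <;> simp [pvInnerA, h, ih]

theorem pvOuterA_eq_find (arr : List String) (is : List Int) :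
    pvOuterA arr is = is.find? (fun i =>
      (PySem.List.pyGetD arr (i + 1) "" == "1")
        && pvInnerA arr (PySem.List.pyRange (i + 2) (arr.length : Int) 1)) := by
  induction is with
  | nil => rfl
  | cons i rest ih =>
    by_cases h1 : PySem.List.pyGetD arr (i + 1) "" = "1"
    · by_cases h2 : pvInnerA arr (PySem.List.pyRange (i + 2) (arr.length : Int) 1) = true
      · rw [List.find?_cons_of_pos (by simp [h1, h2])]
        simp [pvOuterA, h1, h2]
      · rw [List.find?_cons_of_neg (by simp [h2])]
        simp [pvOuterA, h1, h2, ih]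
    · rw [List.find?_cons_of_neg (by simp [h1])]
      simp [pvOuterA, h1, ih]

theorem pvScanB_eq_find (arr : List String) (ks : List Int) :
    pvScanB arr ks = (ks.find? (fun k => !(PySem.List.pyGetD arr k "" == "0"))).bind
      (fun k => if PySem.List.pyGetD arr k "" = "1" then some (k - 1) else none) := by
  induction ks with
  | nil => rfl
  | cons k rest ih =>
    by_cases h : PySem.List.pyGetD arr k "" = "0"
    · rw [List.find?_cons_of_neg (by simp [h])]
      simp [pvScanB, h, ih]
    · rw [List.find?_cons_of_pos (by simp [h])]
      simp [pvScanB, h]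

-- the boolean A tests at candidate i, as a Prop
theorem condA_iff (arr : List String) (i : Int) :
    ((PySem.List.pyGetD arr (i + 1) "" == "1")
        && pvInnerA arr (PySem.List.pyRange (i + 2) (arr.length : Int) 1)) = true
      ↔ PySem.List.pyGetD arr (i + 1) "" = "1"
        ∧ ∀ j, i + 2 ≤ j → j < (arr.length : Int) → PySem.List.pyGetD arr j "" = "0" := by
  simp [pvInnerA_iff, PySem.List.mem_pyRange_one]

-- existence of the last non-'0' index in [1, m]
theorem pvExistsMax (arr : List String) :
    ∀ m : Nat, (¬ ∀ k : Int, 1 ≤ k → k ≤ (m : Int) → PySem.List.pyGetD arr k "" = "0") →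
      ∃ K : Int, 1 ≤ K ∧ K ≤ (m : Int) ∧ PySem.List.pyGetD arr K "" ≠ "0" ∧
        ∀ k : Int, K < k → k ≤ (m : Int) → PySem.List.pyGetD arr k "" = "0" := by
  intro m
  induction m with
  | zero => intro h; exact absurd (fun k hk1 hk0 => absurd (le_trans hk1 hk0) (by norm_num)) h
  | succ m ih =>
    intro h
    by_cases hm : PySem.List.pyGetD arr ((m : Int) + 1) "" = "0"
    · have h' : ¬ ∀ k : Int, 1 ≤ k → k ≤ (m : Int) → PySem.List.pyGetD arr k "" = "0" := by
        intro hall; apply h; intro k hk1 hk2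
        rcases lt_or_eq_of_le hk2 with hlt | heq
        · exact hall k hk1 (by push_cast at hlt ⊢; omega)
        · rw [show k = (m : Int) + 1 by push_cast at heq ⊢; omega]; exact hm
      obtain ⟨K, h1, h2, h3, h4⟩ := ih h'
      refine ⟨K, h1, by push_cast; omega, h3, ?_⟩
      intro k hk1 hk2
      rcases lt_or_eq_of_le hk2 with hlt | heq
      · exact h4 k hk1 (by push_cast at hlt ⊢; omega)
      · rw [show k = (m : Int) + 1 by push_cast at heq ⊢; omega]; exact hm
    · exact ⟨(m : Int) + 1, by omega, by push_cast; omega, hm,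
        fun k hk1 hk2 => by push_cast at hk2; omega⟩

theorem checkRule1_spec_aux (arr : List String) :
    checkRule1 arr = checkRule1_alt arr := by
  unfold checkRule1 checkRule1_alt
  rw [pvOuterA_eq_find, pvScanB_eq_find]
  rcases Nat.eq_zero_or_pos arr.length with hn | hn
  · rw [hn]
    norm_num [PySem.List.pyRange_one_eq_nil, PySem.List.pyRange_neg_one_eq_nil]
  set N : Int := (arr.length : Int) with hN
  have hN1 : 1 ≤ N := by omega
  -- the descending range B scans is the reverse of [1, N)
  have hrev : PySem.List.pyRange (N - 1) 0 (-1) = (PySem.List.pyRange 1 N 1).reverse := by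
    rw [PySem.List.pyRange_neg_one_eq_reverse]; norm_num
  by_cases hall : ∀ k : Int, 1 ≤ k → k ≤ N - 1 → PySem.List.pyGetD arr k "" = "0"
  · -- every element after index 0 is '0': both sides are none
    have hB : (PySem.List.pyRange (N - 1) 0 (-1)).find?
        (fun k => !(PySem.List.pyGetD arr k "" == "0")) = none := by
      rw [List.find?_eq_none]
      intro k hk
      rw [hrev, List.mem_reverse, PySem.List.mem_pyRange_one] at hk
      simp [hall k hk.1 (by omega)]
    have hA : (PySem.List.pyRange 0 (N - 1) 1).find? (fun i =>
        (PySem.List.pyGetD arr (i + 1) "" == "1")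
          && pvInnerA arr (PySem.List.pyRange (i + 2) (arr.length : Int) 1)) = none := by
      rw [List.find?_eq_none]
      intro i hi
      rw [PySem.List.mem_pyRange_one] at hi
      simp only [Bool.not_eq_true]
      rw [Bool.eq_false_iff]
      intro hc
      rw [condA_iff] at hc
      rw [hall (i + 1) (by omega) (by omega)] at hc
      exact absurd hc.1 (by decide)
    rw [hA, hB]; rfl
  · obtain ⟨K, hK1, hK2, hKne, hKz⟩ := by
      have := pvExistsMax arr (arr.length - 1)
      rw [show ((arr.length - 1 : Nat) : Int) = N - 1 by omega] at this
      exact this hall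
    -- B's find? returns K, the last non-'0' index
    have hB : (PySem.List.pyRange (N - 1) 0 (-1)).find?
        (fun k => !(PySem.List.pyGetD arr k "" == "0")) = some K := by
      rw [hrev,
        PySem.List.pyRange_one_append 1 (K + 1) N (by omega) (by omega),
        List.reverse_append, List.find?_append]
      have hfst : (PySem.List.pyRange (K + 1) N 1).reverse.find?
          (fun k => !(PySem.List.pyGetD arr k "" == "0")) = none := by
        rw [List.find?_eq_none]
        intro k hk
        rw [List.mem_reverse, PySem.List.mem_pyRange_one] at hk
        simp [hKz k (by omega) (by omega)]
      rw [hfst, PySem.List.pyRange_one_succ_right (by omega : (1 : Int) ≤ K),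
        List.reverse_append]
      simp only [List.reverse_cons, List.reverse_nil, List.nil_append, List.singleton_append,
        Option.none_or]
      rw [List.find?_cons_of_pos (by simp [hKne])]
    rw [hB]
    by_cases hK1' : PySem.List.pyGetD arr K "" = "1"
    · -- last non-'0' is '1' at K ≥ 1: A finds i = K - 1 first
      have hinner : pvInnerA arr (PySem.List.pyRange (K - 1 + 2) (arr.length : Int) 1) = true := by
        rw [pvInnerA_iff]
        intro j hj
        rw [PySem.List.mem_pyRange_one] at hj
        exact hKz j (by omega) (by omega)
      have hA : (PySem.List.pyRange 0 (N - 1) 1).find? (fun i =>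
          (PySem.List.pyGetD arr (i + 1) "" == "1")
            && pvInnerA arr (PySem.List.pyRange (i + 2) (arr.length : Int) 1)) = some (K - 1) := by
        rw [PySem.List.pyRange_one_append 0 (K - 1) (N - 1) (by omega) (by omega),
          List.find?_append]
        have hfst : (PySem.List.pyRange 0 (K - 1) 1).find? (fun i =>
            (PySem.List.pyGetD arr (i + 1) "" == "1")
              && pvInnerA arr (PySem.List.pyRange (i + 2) (arr.length : Int) 1)) = none := by
          rw [List.find?_eq_none]
          intro i hi
          rw [PySem.List.mem_pyRange_one] at hi
          simp only [Bool.not_eq_true]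
          rw [Bool.eq_false_iff]
          intro hc
          rw [condA_iff] at hc
          -- the suffix from i+2 contains K, which is '1', not '0'
          have := hc.2 K (by omega) (by omega)
          rw [hK1'] at this; exact absurd this (by decide)
        rw [hfst, PySem.List.pyRange_one_cons (by omega : K - 1 < N - 1),
          List.find?_cons_of_pos (by simp [show K - 1 + 1 = K by omega, hK1', hinner])]
        rfl
      rw [hA]; simp [hK1']
    · -- last non-'0' is neither '0' nor '1': no candidate works, both none
      have hA : (PySem.List.pyRange 0 (N - 1) 1).find? (fun i =>
          (PySem.List.pyGetD arr (i + 1) "" == "1")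
            && pvInnerA arr (PySem.List.pyRange (i + 2) (arr.length : Int) 1)) = none := by
        rw [List.find?_eq_none]
        intro i hi
        rw [PySem.List.mem_pyRange_one] at hi
        simp only [Bool.not_eq_true]
        rw [Bool.eq_false_iff]
        intro hc
        rw [condA_iff] at hc
        rcases lt_trichotomy (i + 1) K with h | h | h
        · exact hKne (hc.2 K (by omega) (by omega))
        · rw [h] at hc; exact hK1' hc.1
        · rw [hKz (i + 1) (by omega) (by omega)] at hc
          exact absurd hc.1 (by decide)
      rw [hA]; simp [hK1']

-- ===== VERDICT (by name: the statement is the Claim_ definition above) =====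
theorem checkRule1_spec : Claim_equal_checkRule1 := by
  intro arr _
  unfold Spec_checkRule1
  exact checkRule1_spec_aux arr
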